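-- pv_equiv track=rewrite | github.com/kuhnia/Python | week_1/application.py | f12
-- ===== SOURCE A (Python) =====
-- def f12(a):
--     forSum = []
--     for i in range(4):
--         temp = a
--         for j in range(i):
--             temp = temp * 10 + a
--         forSum.append(temp)
--     return sum(forSum)
-- ===== SOURCE B (Python) =====
-- def f12(a):
--     total = 0
--     r = 0
--     for _ in range(4):
--         r = r * 10 + 1
--         total += a * r
--     return total
-- ===== Notes on version B (the rewrite author's own statement) =====
-- stated objective: simpler
-- what changed: Replaces the nested loop that builds a list of partial repunit-multiples and sums it with a single pass maintaining a running integer repunit r and an accumulator total += a*r.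
import Mathlib
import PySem

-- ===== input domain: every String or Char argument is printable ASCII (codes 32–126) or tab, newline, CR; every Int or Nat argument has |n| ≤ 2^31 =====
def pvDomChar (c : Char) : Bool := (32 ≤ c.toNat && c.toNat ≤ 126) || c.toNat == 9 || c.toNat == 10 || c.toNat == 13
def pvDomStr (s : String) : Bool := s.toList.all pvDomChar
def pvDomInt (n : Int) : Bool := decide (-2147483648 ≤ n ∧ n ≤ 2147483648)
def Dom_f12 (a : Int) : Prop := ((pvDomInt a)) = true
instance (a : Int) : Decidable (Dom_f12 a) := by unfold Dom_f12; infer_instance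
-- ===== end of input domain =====

-- B replaces A's nested loop + list + sum by a single pass with a running repunit; objective: simpler.

-- ===== PORT A =====
-- inner loop: for j in range(i): temp = temp * 10 + a
def f12_inner (a : Int) (i : Nat) (temp : Int) : Int :=
  (PySem.List.pyRange 0 i 1).foldl (fun t _ => t * 10 + a) temp

def f12 (a : Int) : Int :=
  let forSum := (PySem.List.pyRange 0 4 1).foldl
    (fun acc i => acc ++ [f12_inner a i.toNat a]) []
  forSum.foldl (· + ·) 0

-- ===== PORT B =====
def f12_alt (a : Int) : Int :=
  let st := (PySem.List.pyRange 0 4 1).foldl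
    (fun (p : Int × Int) _ =>
      let r := p.2 * 10 + 1
      (p.1 + a * r, r)) (0, 0)
  st.1

-- ===== PRECONDITION & SPEC =====
def Spec_f12 (a : Int) (out : Int) : Prop := out = f12_alt a
instance (a : Int) (out : Int) : Decidable (Spec_f12 a out) := by unfold Spec_f12; infer_instance

-- ===== CLAIM (what is proved, stated in full; the proofs are below) =====
def Claim_equal_f12 : Prop := ∀ (a : Int), Dom_f12 a → Spec_f12 a (f12 a)

-- ===== LEMMAS AND PROOFS =====

-- ===== VERDICT (by name: the statement is the Claim_ definition above) =====
theorem f12_spec : Claim_equal_f12 := by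
  intro a _
  show f12 a = f12_alt a
  simp [f12, f12_alt, f12_inner, PySem.List.pyRange, List.range_succ]
  ring
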